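-- pv_equiv track=rewrite | github.com/f4hy/theaigames_tictactoe | firstbot/pprint.py | pprint_field
-- ===== SOURCE A (Python) =====
-- def pprint_field(field):
--     pstr = ""
--     for y1 in range(3):
--         for y2 in range(3):
--             for j in range(3):
--                 i = (y1*9+y2*3+j)
--                 pstr += "".join(map(str, field[i*3:(i+1)*3]))
--                 pstr += "|"
--             pstr += "\n"
--         pstr += "---+---+---\n"
--     return pstr
-- ===== SOURCE B (Python) =====
-- def pprint_field(field):
--     def go(rest, p):
--         if p == 27:
--             return ""
--         s = "".join(map(str, rest[:3])) + "|"
--         if p % 9 == 8: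
--             s += "\n---+---+---\n"
--         elif p % 3 == 2:
--             s += "\n"
--         return s + go(rest[3:], p + 1)
--     return go(list(field), 0)
-- ===== Notes on version B (the rewrite author's own statement) =====
-- stated objective: alternative
-- what changed: Replaces A's three nested index loops with slice arithmetic by a single recursive pass that consumes the list three cells at a time, deciding separators from the chunk counter modulo 3 and 9.
import Mathlib
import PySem

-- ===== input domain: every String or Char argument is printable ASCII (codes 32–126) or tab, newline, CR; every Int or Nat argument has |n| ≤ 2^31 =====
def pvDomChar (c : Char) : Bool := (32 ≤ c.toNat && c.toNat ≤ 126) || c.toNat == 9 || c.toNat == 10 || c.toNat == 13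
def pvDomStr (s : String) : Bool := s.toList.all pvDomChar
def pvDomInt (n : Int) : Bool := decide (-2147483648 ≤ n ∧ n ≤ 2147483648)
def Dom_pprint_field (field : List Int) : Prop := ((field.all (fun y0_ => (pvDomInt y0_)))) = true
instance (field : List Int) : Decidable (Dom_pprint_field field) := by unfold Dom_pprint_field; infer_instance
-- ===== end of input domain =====

-- B replaces A's nested index loops by one recursive pass consuming the list three
-- cells at a time with modular-counter separators (alternative decomposition).

-- ===== PORT A =====
-- literal transliteration of A: three nested for-loops over range(3), accumulating into pstr
def pprint_field (field : List Int) : String :=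
  (PySem.List.pyRange 0 3 1).foldl (fun pstr y1 =>
    ((PySem.List.pyRange 0 3 1).foldl (fun pstr y2 =>
      ((PySem.List.pyRange 0 3 1).foldl (fun pstr j =>
        let i := y1*9+y2*3+j
        pstr ++ PySem.Str.join "" ((PySem.List.slice field (some (i*3)) (some ((i+1)*3))).map PySem.Int.toStr)
             ++ "|") pstr)
      ++ "\n") pstr)
    ++ "---+---+---\n") ""

-- ===== PORT B =====
-- literal transliteration of B's recursive helper go(rest, p); the counter p only
-- ever counts up from 0, so it is a Nat and the `27 ≤ p` guard coincides with
-- Python's `p == 27` on every reachable call (it also makes the recursion total).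
def pvGo (rest : List Int) (p : Nat) : String :=
  if 27 ≤ p then ""
  else
    let s := PySem.Str.join "" ((PySem.List.slice rest none (some 3)).map PySem.Int.toStr) ++ "|"
    let s := if p % 9 = 8 then s ++ "\n---+---+---\n"
             else if p % 3 = 2 then s ++ "\n" else s
    s ++ pvGo (PySem.List.slice rest (some 3) none) (p + 1)
termination_by 27 - p

def pprint_field_alt (field : List Int) : String := pvGo field 0

-- ===== PRECONDITION & SPEC =====
def Spec_pprint_field (field : List Int) (out : String) : Prop := out = pprint_field_alt field
instance (field : List Int) (out : String) : Decidable (Spec_pprint_field field out) := by unfold Spec_pprint_field; infer_instance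

-- ===== CLAIM =====
def Claim_equal_pprint_field : Prop := ∀ (field : List Int), Dom_pprint_field field → Spec_pprint_field field (pprint_field field)

-- ===== LEMMAS AND PROOFS =====

-- ===== VERDICT =====
set_option maxHeartbeats 2000000 in
theorem pprint_field_spec : Claim_equal_pprint_field := by
  intro field _
  unfold Spec_pprint_field pprint_field_alt
  have h3 : PySem.List.pyRange 0 3 1 = [0,1,2] := by decide
  refine String.toList_inj.mp ?_
  simp only [pprint_field, h3, List.foldl]
  rw [pvGo, pvGo, pvGo, pvGo, pvGo, pvGo, pvGo, pvGo, pvGo, pvGo, pvGo, pvGo, pvGo, pvGo,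
      pvGo, pvGo, pvGo, pvGo, pvGo, pvGo, pvGo, pvGo, pvGo, pvGo, pvGo, pvGo, pvGo, pvGo]
  simp [PySem.List.slice_toNat, PySem.List.slice_to, PySem.List.slice_from,
    PySem.Str.join, PySem.Chars.join, String.toList_append, List.append_assoc,
    List.intercalate, List.drop_drop, Int.reduceToNat]
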